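-- pv_equiv track=rewrite | github.com/Kee0304/TIL | algo/9월/0916/contact.py | BFS
-- ===== SOURCE A (Python) =====
-- def BFS(adj,s):                                            # BFS 탐색 함수. 연결 관계와 시작점을 받는다.
--     q=[]                                                   # 큐
--     visited=[]                                             # visited
--
--     q.append(s)                                            # 큐에 시작점 추가
--     visited.append(s)                                      # 방문 표시
--
--     while 1:
--         tmp=q[:]                                           # 일단 BFS 1회 전에 큐 상태를 저장
--         for _ in range(len(q)):                            # 깊이가 같은 노드들을 한 번에 싹 돌아야 하므로 q의 길이에 대해 반복
--             front=q.pop(0)                                 # front를 pop하고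
--             if front in adj:                               # 만약 front가 연결관계에 키로서 존재하면
--                 for next_node in adj[front]:               # front키에 해당하는 값(리스트형태, 갈 수 있는 다음 노드)에 대해
--                     if next_node not in visited:           # 방문한 적이 없는 노드면
--                         q.append(next_node)                # 큐에 추가하고
--                         visited.append(next_node)          # 방문 표시
--
--         if q==[]:                                          # BFS를 돌려서 큐가 비어있다는 뜻은 이전 큐의 모든 노드들에서 더 이상 갈 수 있는 지점이 없었다는 뜻이므로
--             return tmp                                     # 이전 상태의 큐가 마지막에 동시에 연락받은 사람들이 된다.
-- ===== SOURCE B (Python) =====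
-- def BFS(adj, s):
--     level = [s]
--     visited = [s]
--     while True:
--         next_level = []
--         for front in level:
--             if front in adj:
--                 for next_node in adj[front]:
--                     if next_node not in visited:
--                         next_level.append(next_node)
--                         visited.append(next_node)
--         if next_level == []:
--             return level
--         level = next_level
-- ===== Notes on version B (the rewrite author's own statement) =====
-- stated objective: simpler
-- what changed: Replaces the single FIFO queue with counted pop(0)/append batching and a saved snapshot by two plain lists (current level, next level), returning the current level when no new node is discovered.
import Mathlib
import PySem

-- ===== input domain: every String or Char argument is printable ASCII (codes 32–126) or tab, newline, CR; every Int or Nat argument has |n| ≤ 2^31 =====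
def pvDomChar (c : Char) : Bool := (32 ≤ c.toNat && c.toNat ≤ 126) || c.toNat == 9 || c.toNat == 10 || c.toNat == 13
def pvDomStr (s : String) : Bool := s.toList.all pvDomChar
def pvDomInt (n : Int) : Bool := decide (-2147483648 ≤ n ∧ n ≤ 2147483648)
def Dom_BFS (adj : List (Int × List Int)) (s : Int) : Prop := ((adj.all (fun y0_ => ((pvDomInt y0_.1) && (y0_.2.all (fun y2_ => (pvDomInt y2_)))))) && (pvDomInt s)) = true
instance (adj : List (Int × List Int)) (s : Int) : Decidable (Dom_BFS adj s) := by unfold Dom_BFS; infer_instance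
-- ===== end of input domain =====

-- B rewrites A's counted pop(0)/append queue batching as two plain level lists (simpler decomposition, same level order).

-- ===== PORT A =====
-- visiting one child: 'if next_node not in visited: <out>.append(next_node); visited.append(next_node)'
-- (the two Pythons share these two lines verbatim, so both ports use this helper)
def pvVisit (p : List Int × List Int) (nn : Int) : List Int × List Int :=
  if p.2.contains nn then p else (p.1 ++ [nn], p.2 ++ [nn])

-- 'if front in adj: for next_node in adj[front]: …'  (dict membership/lookup = first match)
def pvExpand (adj : List (Int × List Int)) (p : List Int × List Int) (front : Int) :
    List Int × List Int :=
  match (PySem.Dict.mk adj).get? front with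
  | some lst => lst.foldl pvVisit p
  | none => p

-- 'for _ in range(len(q)): front = q.pop(0); …' — n counted pops off the single queue
def pvRoundA (adj : List (Int × List Int)) : Nat → List Int → List Int → List Int × List Int
  | 0, q, visited => (q, visited)
  | n + 1, q, visited =>
    match q with
    | [] => (q, visited)          -- unreachable totality guard: n = len(q), pop(0) never fails
    | front :: rest =>
      let p := pvExpand adj (rest, visited) front
      pvRoundA adj n p.1 p.2

-- 'while 1: tmp = q[:]; <round>; if q == []: return tmp' — fuel is only a totality guard
def pvLoopA (adj : List (Int × List Int)) : Nat → List Int → List Int → List Int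
  | 0, q, _ => q
  | f + 1, q, visited =>
    let tmp := q
    let p := pvRoundA adj q.length q visited
    if p.1 = [] then tmp else pvLoopA adj f p.1 p.2

-- visited never exceeds s plus all adjacency-list entries, and each continuing round grows it
def pvFuel (adj : List (Int × List Int)) : Nat :=
  (adj.map (fun kv => kv.2.length)).sum + 2

def BFS (adj : List (Int × List Int)) (s : Int) : List Int :=
  pvLoopA adj (pvFuel adj) [s] [s]

-- ===== PORT B =====
-- 'while True: next_level = []; for front in level: …; if next_level == []: return level; level = next_level'
def pvLoopB (adj : List (Int × List Int)) : Nat → List Int → List Int → List Int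
  | 0, level, _ => level
  | f + 1, level, visited =>
    let p := level.foldl (pvExpand adj) ([], visited)
    if p.1 = [] then level else pvLoopB adj f p.1 p.2

def BFS_alt (adj : List (Int × List Int)) (s : Int) : List Int :=
  pvLoopB adj (pvFuel adj) [s] [s]

-- ===== PRECONDITION & SPEC =====
def Spec_BFS (adj : List (Int × List Int)) (s : Int) (out : List Int) : Prop := out = BFS_alt adj s
instance (adj : List (Int × List Int)) (s : Int) (out : List Int) : Decidable (Spec_BFS adj s out) := by unfold Spec_BFS; infer_instance

-- ===== CLAIM (what is proved, stated in full; the proofs are below) =====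
def Claim_equal_BFS : Prop := ∀ (adj : List (Int × List Int)) (s : Int), Dom_BFS adj s → Spec_BFS adj s (BFS adj s)

-- ===== LEMMAS AND PROOFS =====

-- pvVisit only appends to the first component, so a fixed queue prefix passes through the child fold
theorem foldl_pvVisit_prefix (lst : List Int) :
    ∀ (pre acc visited : List Int),
      lst.foldl pvVisit (pre ++ acc, visited) =
        (pre ++ (lst.foldl pvVisit (acc, visited)).1, (lst.foldl pvVisit (acc, visited)).2) := by
  induction lst with
  | nil => intro pre acc visited; simp
  | cons nn lst ih =>
    intro pre acc visited
    simp only [List.foldl_cons, pvVisit]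
    by_cases h : nn ∈ visited
    · simp only [List.contains_eq_mem, h, decide_true, if_true]
      exact ih pre acc visited
    · simp only [List.contains_eq_mem, h, decide_false, Bool.false_eq_true, if_false]
      rw [List.append_assoc]
      exact ih pre (acc ++ [nn]) (visited ++ [nn])

theorem pvExpand_prefix (adj : List (Int × List Int)) (front : Int)
    (pre acc visited : List Int) :
    pvExpand adj (pre ++ acc, visited) front =
      (pre ++ (pvExpand adj (acc, visited) front).1, (pvExpand adj (acc, visited) front).2) := by
  unfold pvExpand
  cases (PySem.Dict.mk adj).get? front with
  | none => rfl
  | some lst => exact foldl_pvVisit_prefix lst pre acc visited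

-- A's counted-pop round over queue q (with acc already appended behind it) is B's fold over q
theorem round_eq_fold (adj : List (Int × List Int)) (q : List Int) :
    ∀ (acc visited : List Int),
      pvRoundA adj q.length (q ++ acc) visited = q.foldl (pvExpand adj) (acc, visited) := by
  induction q with
  | nil => intro acc visited; simp [pvRoundA]
  | cons front rest ih =>
    intro acc visited
    simp only [List.length_cons, List.cons_append, pvRoundA, List.foldl_cons]
    rw [pvExpand_prefix adj front rest acc visited]
    exact ih _ _

theorem loopA_eq_loopB (adj : List (Int × List Int)) :
    ∀ (f : Nat) (q visited : List Int), pvLoopA adj f q visited = pvLoopB adj f q visited := by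
  intro f
  induction f with
  | zero => intro q visited; rfl
  | succ f ih =>
    intro q visited
    simp only [pvLoopA, pvLoopB]
    have h : pvRoundA adj q.length q visited = q.foldl (pvExpand adj) ([], visited) := by
      have := round_eq_fold adj q [] visited
      simpa using this
    rw [h]
    split
    · rfl
    · exact ih _ _

-- ===== VERDICT (by name: the statement is the Claim_ definition above) =====
theorem BFS_spec : Claim_equal_BFS := by
  intro adj s _
  unfold Spec_BFS BFS BFS_alt
  exact loopA_eq_loopB adj (pvFuel adj) [s] [s]
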